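-- pv_equiv track=rewrite | github.com/giolux1235/energyplus-mcp-wrapper | simple-fixed-parser.py | _determine_building_type
-- ===== SOURCE A (Python) =====
-- from typing import Dict, List, Any, Optional, Tuple
--
-- def _determine_building_type(content: str, zones: List[Dict]) -> str:
--     """Determine building type"""
--     zone_names = [zone.get('name', '').lower() for zone in zones]
--
--     if any('retail' in name or 'store' in name or 'supermarket' in name for name in zone_names):
--         return 'retail'
--     elif any('office' in name or 'work' in name for name in zone_names):
--         return 'office'
--     elif any('residential' in name or 'apartment' in name or 'home' in name for name in zone_names):
--         return 'residential'
--     else: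
--         return 'office'
-- ===== SOURCE B (Python) =====
-- def _determine_building_type(content, zones):
--     """Single pass over zones maintaining one flag per category, then resolve by priority."""
--     retail = office = residential = False
--     for zone in zones:
--         name = zone.get('name', '').lower()
--         if 'retail' in name or 'store' in name or 'supermarket' in name:
--             retail = True
--         if 'office' in name or 'work' in name:
--             office = True
--         if 'residential' in name or 'apartment' in name or 'home' in name:
--             residential = True
--     if retail:
--         return 'retail'
--     if office:
--         return 'office'
--     if residential:
--         return 'residential'
--     return 'office'
-- ===== Notes on version B (the rewrite author's own statement) =====
-- stated objective: alternative
-- what changed: Replaces A's three category-outer any-scans over the zone-name list with one pass over the zones maintaining a flag per category, resolved afterwards by priority (retail > office > residential > default office).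
import Mathlib
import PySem

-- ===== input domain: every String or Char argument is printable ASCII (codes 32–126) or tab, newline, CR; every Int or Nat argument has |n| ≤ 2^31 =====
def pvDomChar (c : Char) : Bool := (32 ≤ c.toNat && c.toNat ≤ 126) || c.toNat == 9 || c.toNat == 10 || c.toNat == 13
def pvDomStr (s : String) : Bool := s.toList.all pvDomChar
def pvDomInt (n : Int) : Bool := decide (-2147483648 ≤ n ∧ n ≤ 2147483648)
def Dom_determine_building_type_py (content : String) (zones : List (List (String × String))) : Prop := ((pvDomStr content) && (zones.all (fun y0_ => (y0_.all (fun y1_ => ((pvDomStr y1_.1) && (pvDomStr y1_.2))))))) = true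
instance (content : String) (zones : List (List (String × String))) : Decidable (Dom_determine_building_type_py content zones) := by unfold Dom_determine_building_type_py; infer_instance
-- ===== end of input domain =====

-- B replaces A's three category-outer any-scans with one pass over the zones keeping a flag per
-- category, resolved afterwards by priority (alternative decomposition; return value only).

-- zone.get('name', '').lower()  (assoc-list lookup = first match, per the type convention)
def pvZoneName (zone : List (String × String)) : String :=
  PySem.Str.lower ((zone.lookup "name").getD "")

def pvRetailP (name : String) : Bool :=
  PySem.Str.isIn "retail" name || PySem.Str.isIn "store" name || PySem.Str.isIn "supermarket" name

def pvOfficeP (name : String) : Bool :=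
  PySem.Str.isIn "office" name || PySem.Str.isIn "work" name

def pvResP (name : String) : Bool :=
  PySem.Str.isIn "residential" name || PySem.Str.isIn "apartment" name || PySem.Str.isIn "home" name

-- ===== PORT A =====
def determine_building_type_py (content : String) (zones : List (List (String × String))) : String :=
  let zone_names := zones.map pvZoneName
  if zone_names.any (fun name => pvRetailP name) then "retail"
  else if zone_names.any (fun name => pvOfficeP name) then "office"
  else if zone_names.any (fun name => pvResP name) then "residential"
  else "office"

-- ===== PORT B =====
-- the loop: one fold over zones updating the three flags (retail, office, residential)
def pvFlagsStep (st : Bool × Bool × Bool) (zone : List (String × String)) : Bool × Bool × Bool :=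
  let name := pvZoneName zone
  let st1 := if pvRetailP name then (true, st.2.1, st.2.2) else st
  let st2 := if pvOfficeP name then (st1.1, true, st1.2.2) else st1
  if pvResP name then (st2.1, st2.2.1, true) else st2

def determine_building_type_py_alt (content : String) (zones : List (List (String × String))) : String :=
  let flags := zones.foldl pvFlagsStep (false, false, false)
  if flags.1 then "retail"
  else if flags.2.1 then "office"
  else if flags.2.2 then "residential"
  else "office"

-- ===== PRECONDITION & SPEC =====
def Spec_determine_building_type_py (content : String) (zones : List (List (String × String))) (out : String) : Prop := out = determine_building_type_py_alt content zones
instance (content : String) (zones : List (List (String × String))) (out : String) : Decidable (Spec_determine_building_type_py content zones out) := by unfold Spec_determine_building_type_py; infer_instance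

-- ===== CLAIM (what is proved, stated in full; the proofs are below) =====
def Claim_equal_determine_building_type_py : Prop := ∀ (content : String) (zones : List (List (String × String))), Dom_determine_building_type_py content zones → Spec_determine_building_type_py content zones (determine_building_type_py content zones)

-- ===== LEMMAS AND PROOFS =====

-- ===== VERDICT (by name: the statement is the Claim_ definition above) =====
theorem pvFlags_foldl (zones : List (List (String × String))) (r o d : Bool) :
    zones.foldl pvFlagsStep (r, o, d) =
      (r || zones.any (fun z => pvRetailP (pvZoneName z)),
       o || zones.any (fun z => pvOfficeP (pvZoneName z)),
       d || zones.any (fun z => pvResP (pvZoneName z))) := by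
  induction zones generalizing r o d with
  | nil => simp
  | cons z zs ih =>
    simp only [List.foldl_cons, List.any_cons, pvFlagsStep]
    split_ifs <;> simp [ih] <;> simp_all

theorem determine_building_type_py_spec : Claim_equal_determine_building_type_py := by
  intro content zones _
  unfold Spec_determine_building_type_py determine_building_type_py determine_building_type_py_alt
  rw [pvFlags_foldl]
  simp [List.any_map, Function.comp]
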